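-- pv_equiv track=rewrite | github.com/saulpw/visidata | visidata/regex.py | indexWithEscape
-- ===== SOURCE A (Python) =====
-- def indexWithEscape(s, char, escape_char='\\'):
--     i=0
--     while i < len(s):
--         if s[i] == escape_char:
--             i += 1
--         elif s[i] == char:
--             return i
--         i += 1
--
--     return None
-- ===== SOURCE B (Python) =====
-- def indexWithEscape(s, char, escape_char='\\'):
--     # pass 1: mark every index belonging to an escape sequence, tracking with a flag
--     consumed = set()
--     pending = False
--     for i, c in enumerate(s):
--         if pending:
--             consumed.add(i)
--             pending = False
--         elif c == escape_char:
--             consumed.add(i)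
--             pending = True
--     # pass 2: first unconsumed position holding char
--     for i, c in enumerate(s):
--         if i not in consumed and c == char:
--             return i
--     return None
-- ===== Notes on version B (the rewrite author's own statement) =====
-- stated objective: alternative
-- what changed: Replaces A's index-jumping while-loop with early return by a two-pass decomposition: a flag-tracking enumerate fold first collects the set of indices consumed by escape sequences, then a second enumerate scan returns the first unconsumed index equal to char.
import Mathlib
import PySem

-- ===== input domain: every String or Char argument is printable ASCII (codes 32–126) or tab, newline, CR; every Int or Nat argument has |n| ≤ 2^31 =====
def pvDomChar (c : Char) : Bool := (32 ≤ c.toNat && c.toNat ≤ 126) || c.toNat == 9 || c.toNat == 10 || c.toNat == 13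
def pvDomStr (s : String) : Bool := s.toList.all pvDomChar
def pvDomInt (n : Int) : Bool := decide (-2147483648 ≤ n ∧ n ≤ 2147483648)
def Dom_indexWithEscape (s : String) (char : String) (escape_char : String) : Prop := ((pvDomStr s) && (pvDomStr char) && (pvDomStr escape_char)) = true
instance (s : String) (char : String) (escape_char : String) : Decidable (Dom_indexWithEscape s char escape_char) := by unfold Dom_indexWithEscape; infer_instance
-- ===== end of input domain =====

-- B replaces A's single scanning while-loop by a two-pass decomposition (mark escape-consumed
-- indices as a set, then an enumerate search); same cost, alternative structure.

-- ===== PORT A =====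
-- A's while loop: s[i]==escape_char skips the next position (i += 2 overall); s[i]==char returns i.
def pvLoopA (cs : List Char) (char : String) (esc : String) (i : Int) : Option Int :=
  match cs with
  | [] => none
  | c :: rest =>
    if String.ofList [c] == esc then pvLoopA (rest.drop 1) char esc (i + 2)
    else if String.ofList [c] == char then some i
    else pvLoopA rest char esc (i + 1)
termination_by cs.length
decreasing_by
  all_goals simp

def indexWithEscape (s : String) (char : String) (escape_char : String) : Option Int :=
  pvLoopA s.toList char escape_char 0

-- ===== PORT B =====
-- pass 1: mark every index belonging to an escape sequence, tracking with a 'pending' flag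
def pvMarkB (cs : List Char) (esc : String) (i : Int) (pending : Bool) (consumed : PySem.Set Int) : PySem.Set Int :=
  match cs with
  | [] => consumed
  | c :: rest =>
    if pending then pvMarkB rest esc (i + 1) false (PySem.Set.add consumed i)
    else if String.ofList [c] == esc then pvMarkB rest esc (i + 1) true (PySem.Set.add consumed i)
    else pvMarkB rest esc (i + 1) false consumed

-- pass 2: first unconsumed position holding char
def pvFindB (ps : List (Int × Char)) (char : String) (consumed : PySem.Set Int) : Option Int :=
  match ps with
  | [] => none
  | (i, c) :: rest =>
    if !(PySem.Set.contains consumed i) && (String.ofList [c] == char) then some i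
    else pvFindB rest char consumed

def indexWithEscape_alt (s : String) (char : String) (escape_char : String) : Option Int :=
  pvFindB (PySem.List.enumerate s.toList 0) char (pvMarkB s.toList escape_char 0 false PySem.Set.empty)

-- ===== PRECONDITION & SPEC =====
def Spec_indexWithEscape (s : String) (char : String) (escape_char : String) (out : Option Int) : Prop := out = indexWithEscape_alt s char escape_char
instance (s : String) (char : String) (escape_char : String) (out : Option Int) : Decidable (Spec_indexWithEscape s char escape_char out) := by unfold Spec_indexWithEscape; infer_instance

-- ===== CLAIM (what is proved, stated in full; the proofs are below) =====
def Claim_equal_indexWithEscape : Prop := ∀ (s : String) (char : String) (escape_char : String), Dom_indexWithEscape s char escape_char → Spec_indexWithEscape s char escape_char (indexWithEscape s char escape_char)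

-- ===== LEMMAS AND PROOFS =====

-- anything already in the accumulator stays in the marked set
theorem pvMarkB_mem_of_acc (cs : List Char) (esc : String) (i : Int) (p : Bool)
    (acc : PySem.Set Int) (j : Int) (hj : j ∈ acc) : j ∈ pvMarkB cs esc i p acc := by
  induction cs generalizing i p acc with
  | nil => simpa [pvMarkB] using hj
  | cons c rest ih =>
    rw [pvMarkB]
    split
    · exact ih _ _ _ (by simp [PySem.Set.mem_add]; tauto)
    · split
      · exact ih _ _ _ (by simp [PySem.Set.mem_add]; tauto)
      · exact ih _ _ _ hj

-- every marked index comes from the accumulator or is ≥ the start index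
theorem pvMarkB_mem_lower (cs : List Char) (esc : String) (i : Int) (p : Bool)
    (acc : PySem.Set Int) (j : Int) (hj : j ∈ pvMarkB cs esc i p acc) : j ∈ acc ∨ i ≤ j := by
  induction cs generalizing i p acc with
  | nil => left; simpa [pvMarkB] using hj
  | cons c rest ih =>
    rw [pvMarkB] at hj
    have step : ∀ q acc', (∀ x ∈ acc', x ∈ acc ∨ i ≤ x) →
        j ∈ pvMarkB rest esc (i + 1) q acc' → j ∈ acc ∨ i ≤ j := by
      intro q acc' hsub hmem
      rcases ih _ _ _ hmem with h | h
      · rcases hsub j h with h' | h'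
        · exact Or.inl h'
        · exact Or.inr h'
      · right; omega
    have hadd : ∀ x ∈ PySem.Set.add acc i, x ∈ acc ∨ i ≤ x := by
      intro x hx
      simp [PySem.Set.mem_add] at hx
      rcases hx with hx | rfl
      · exact Or.inl hx
      · right; omega
    split at hj
    · exact step _ _ hadd hj
    · split at hj
      · exact step _ _ hadd hj
      · exact step _ _ (fun x hx => Or.inl hx) hj

-- main invariant: A's loop from position i equals B's search over the enumerated suffix
theorem pvLoop_eq_find (cs : List Char) (char : String) (esc : String) (i : Int)
    (acc : PySem.Set Int) (hacc : ∀ j ∈ acc, j < i) :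
    pvLoopA cs char esc i
      = pvFindB (PySem.List.enumerate cs i) char (pvMarkB cs esc i false acc) := by
  match cs with
  | [] => simp [pvLoopA, pvMarkB, PySem.List.enumerate, pvFindB]
  | c :: rest =>
    rw [pvLoopA, pvMarkB, PySem.List.enumerate_cons]
    by_cases hesc : String.ofList [c] == esc
    · simp only [Bool.false_eq_true, if_false, hesc, if_true]
      have hi : i ∈ pvMarkB rest esc (i + 1) true (PySem.Set.add acc i) :=
        pvMarkB_mem_of_acc _ _ _ _ _ i (by simp [PySem.Set.mem_add])
      rw [pvFindB]
      have hci : PySem.Set.contains (pvMarkB rest esc (i + 1) true (PySem.Set.add acc i)) i = true :=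
        (PySem.Set.contains_iff _ _).mpr hi
      simp only [hci, Bool.not_true, Bool.false_and]
      rw [if_neg (by simp)]
      match rest with
      | [] => simp [pvLoopA, PySem.List.enumerate, pvFindB]
      | d :: rest2 =>
        rw [pvMarkB]
        simp only [if_true]
        have hi1 : (i + 1) ∈ pvMarkB rest2 esc (i + 1 + 1) false (PySem.Set.add (PySem.Set.add acc i) (i + 1)) :=
          pvMarkB_mem_of_acc _ _ _ _ _ (i + 1) (by simp [PySem.Set.mem_add])
        rw [PySem.List.enumerate_cons, pvFindB]
        simp only [List.drop_succ_cons, List.drop_zero]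
        have hci1 : PySem.Set.contains (pvMarkB rest2 esc (i + 1 + 1) false (PySem.Set.add (PySem.Set.add acc i) (i + 1))) (i + 1) = true :=
          (PySem.Set.contains_iff _ _).mpr hi1
        simp only [hci1, Bool.not_true, Bool.false_and]
        rw [if_neg (by simp)]
        have h2 : i + 1 + 1 = i + 2 := by omega
        rw [h2]
        exact pvLoop_eq_find rest2 char esc (i + 2) _
          (by intro j hj; simp [PySem.Set.mem_add] at hj
              rcases hj with (h | rfl) | rfl
              · have := hacc j h; omega
              · omega
              · omega)
    · simp only [hesc, if_false, Bool.false_eq_true]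
      have hnot : i ∉ pvMarkB rest esc (i + 1) false acc := by
        intro h
        rcases pvMarkB_mem_lower rest esc (i + 1) false acc i h with h' | h'
        · exact absurd (hacc i h') (by omega)
        · omega
      rw [pvFindB]
      have hc : PySem.Set.contains (pvMarkB rest esc (i + 1) false acc) i = false := by
        rcases Bool.eq_false_or_eq_true (PySem.Set.contains (pvMarkB rest esc (i + 1) false acc) i) with h | h
        · exact absurd ((PySem.Set.contains_iff _ _).mp h) hnot
        · exact h
      simp only [hc, Bool.not_false, Bool.true_and]
      by_cases hchar : String.ofList [c] == char
      · simp [hchar]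
      · rw [if_neg hchar, if_neg hchar]
        exact pvLoop_eq_find rest char esc (i + 1) acc (by intro j hj; have := hacc j hj; omega)
termination_by cs.length
decreasing_by
  all_goals simp

-- ===== VERDICT (by name: the statement is the Claim_ definition above) =====
theorem indexWithEscape_spec : Claim_equal_indexWithEscape := by
  intro s char escape_char _
  unfold Spec_indexWithEscape indexWithEscape indexWithEscape_alt
  exact pvLoop_eq_find s.toList char escape_char 0 PySem.Set.empty (by intro j hj; simp [PySem.Set.empty] at hj)
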